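-- pv_equiv track=rewrite | github.com/tejvuligonda/Interview-Practice | Python/numMissing0to99.py | approachOne
-- ===== SOURCE A (Python) =====
-- def approachOne(arr):
--     missing = set()
--     for i in range(100):
--         missing.add(i)
--     given = set(arr)
--     missin = missing - given
--     result = ''
--     high = 0
--     low = 0
--     missin = sorted(list(missin))
--     if missin:
--         low = missin[0]
--     for i in range(len(list(missin))):
--         high = missin[i]
--         if (i == len(missin) - 1) or (missin[i+1] - missin[i] > 1):
--             if low == high:
--                 temp = str(low) + ','
--             else:
--                 temp = str(low) + '-' + str(high) + ','
--             result += temp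
--             if (i != len(missin) - 1):
--                 low = missin[i+1]
--     return result[:-1]
-- ===== SOURCE B (Python) =====
-- def approachOne(arr):
--     given = set(arr)
--     parts = []
--     i = 0
--     while i < 100:
--         if i in given:
--             i += 1
--             continue
--         start = i
--         while i + 1 < 100 and (i + 1) not in given:
--             i += 1
--         parts.append(str(start) if start == i else str(start) + '-' + str(i))
--         i += 1
--     return ','.join(parts)
-- ===== Notes on version B (the rewrite author's own statement) =====
-- stated objective: simpler
-- what changed: Replaces A's build-a-0..99-set / set-difference / sort / index-based fold with trailing-comma stripping by a single forward scan of 0..99 against set(arr) that collects maximal missing runs and joins them with ','.join.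
import Mathlib
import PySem

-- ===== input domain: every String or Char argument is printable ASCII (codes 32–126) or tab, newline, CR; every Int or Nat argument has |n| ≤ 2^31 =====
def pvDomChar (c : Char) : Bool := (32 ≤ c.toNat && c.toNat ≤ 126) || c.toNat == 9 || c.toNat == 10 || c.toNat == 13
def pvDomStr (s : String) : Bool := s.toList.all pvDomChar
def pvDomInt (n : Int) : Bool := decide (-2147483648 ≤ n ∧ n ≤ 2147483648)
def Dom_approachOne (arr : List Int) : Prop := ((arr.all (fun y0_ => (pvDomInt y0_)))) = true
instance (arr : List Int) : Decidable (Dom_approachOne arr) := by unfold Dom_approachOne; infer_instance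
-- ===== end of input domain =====

-- B replaces A's build-0..99-set / set-difference / sort / index-fold with a single forward scan
-- of 0..99 against a membership set, collecting maximal missing runs and joining them (simpler; return value only).

-- ===== PORT A =====
-- the body of A's 'for i in range(len(missin))' loop, as a step function on the state (result, low, high)
def pvStepA (missin : List Int) (st : List Char × Int × Int) (i : Nat) : List Char × Int × Int :=
  let high := missin.getD i 0
  if (i : Int) = (missin.length : Int) - 1 ∨ missin.getD (i+1) 0 - missin.getD i 0 > 1 then
    let temp : List Char :=
      if st.2.1 = high then PySem.Int.toChars st.2.1 ++ [',']
      else PySem.Int.toChars st.2.1 ++ '-' :: PySem.Int.toChars high ++ [',']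
    let low' := if (i : Int) ≠ (missin.length : Int) - 1 then missin.getD (i+1) 0 else st.2.1
    (st.1 ++ temp, low', high)
  else (st.1, st.2.1, high)

def approachOne (arr : List Int) : String :=
  let missing : PySem.Set Int := (PySem.List.pyRange 0 100).foldl PySem.Set.add PySem.Set.empty
  let given : PySem.Set Int := PySem.Set.ofList arr
  let missin := PySem.List.sorted (PySem.Set.diff missing given) (fun x => x)
  let low0 : Int := if 0 < missin.length then (PySem.List.pyGet? missin 0).getD 0 else 0
  let st := (List.range missin.length).foldl (pvStepA missin) ([], low0, 0)
  String.ofList (PySem.List.slice st.1 none (some (-1)))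

-- ===== PORT B =====
-- str(start) / str(start)+'-'+str(i)
def pvFmtRun (s e : Nat) : List Char :=
  if s = e then PySem.Int.toChars (s : Int)
  else PySem.Int.toChars (s : Int) ++ '-' :: PySem.Int.toChars (e : Int)

-- the inner 'while i + 1 < 100 and (i + 1) not in given: i += 1'
def pvRunEnd (given : PySem.Set Int) (i : Nat) : Nat :=
  if h : i + 1 < 100 ∧ PySem.Set.contains given ((i : Int) + 1) = false then pvRunEnd given (i + 1)
  else i
termination_by 100 - i
decreasing_by omega

theorem pvRunEnd_ge (given : PySem.Set Int) (i : Nat) : i ≤ pvRunEnd given i := by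
  induction i using pvRunEnd.induct given with
  | case1 i h ih => rw [pvRunEnd, dif_pos h]; omega
  | case2 i h => rw [pvRunEnd, dif_neg h]

-- the outer 'while i < 100' loop, collecting the formatted runs
def pvCollect (given : PySem.Set Int) (i : Nat) : List String :=
  if h : i < 100 then
    if PySem.Set.contains given (i : Int) then pvCollect given (i + 1)
    else
      let e := pvRunEnd given i
      String.ofList (pvFmtRun i e) :: pvCollect given (e + 1)
  else []
termination_by 100 - i
decreasing_by
  · omega
  · have := pvRunEnd_ge given i; omega

def approachOne_alt (arr : List Int) : String :=
  PySem.Str.join "," (pvCollect (PySem.Set.ofList arr) 0)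

-- ===== PRECONDITION & SPEC =====
def Spec_approachOne (arr : List Int) (out : String) : Prop := out = approachOne_alt arr
instance (arr : List Int) (out : String) : Decidable (Spec_approachOne arr out) := by unfold Spec_approachOne; infer_instance

-- ===== CLAIM (what is proved, stated in full; the proofs are below) =====
def Claim_equal_approachOne : Prop := ∀ (arr : List Int), Dom_approachOne arr → Spec_approachOne arr (approachOne arr)

-- ===== LEMMAS AND PROOFS =====

-- canonical run decomposition of a strictly increasing list
def pvGoChunk (lo hi : Int) : List Int → List (Int × Int)
  | [] => [(lo, hi)]
  | y :: ys => if y = hi + 1 then pvGoChunk lo y ys else (lo, hi) :: pvGoChunk y y ys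

def pvChunks : List Int → List (Int × Int)
  | [] => []
  | x :: xs => pvGoChunk x x xs

def pvFmtI (p : Int × Int) : List Char :=
  if p.1 = p.2 then PySem.Int.toChars p.1
  else PySem.Int.toChars p.1 ++ '-' :: PySem.Int.toChars p.2

-- the missing numbers in [i, 100), in increasing order
def pvMiss (g : PySem.Set Int) (i : Int) : List Int :=
  (PySem.List.pyRange i 100).filter (fun x => !PySem.Set.contains g x)

theorem pvMiss_nil (g : PySem.Set Int) (i : Int) (h : 100 ≤ i) : pvMiss g i = [] := by
  unfold pvMiss; rw [PySem.List.pyRange_one_eq_nil h]; rfl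

theorem pvMiss_step (g : PySem.Set Int) (i : Int) (h : i < 100) :
    pvMiss g i = if PySem.Set.contains g i then pvMiss g (i + 1) else i :: pvMiss g (i + 1) := by
  unfold pvMiss; rw [PySem.List.pyRange_one_cons h, List.filter_cons]
  cases hc : PySem.Set.contains g i <;> simp

theorem pvMiss_mem (g : PySem.Set Int) (i x : Int) (hx : x ∈ pvMiss g i) : i ≤ x ∧ x < 100 := by
  unfold pvMiss at hx
  have := List.mem_of_mem_filter hx
  exact PySem.List.mem_pyRange_one.mp this

theorem pvMiss_pairwise (g : PySem.Set Int) (i : Int) : (pvMiss g i).Pairwise (· < ·) := by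
  exact (PySem.List.pairwise_lt_pyRange_one i 100).filter _

theorem pvGoChunk_ne_nil (lo hi : Int) (xs : List Int) : pvGoChunk lo hi xs ≠ [] := by
  induction xs generalizing lo hi with
  | nil => simp [pvGoChunk]
  | cons y ys ih =>
    rw [pvGoChunk]
    split
    · exact ih lo y
    · simp

theorem pvRunEnd_chunk (g : PySem.Set Int) :
    ∀ (k i : Nat), 100 - i ≤ k → i < 100 → ∀ lo : Int,
      pvGoChunk lo (i : Int) (pvMiss g ((i : Int) + 1)) =
        (lo, ((pvRunEnd g i : Nat) : Int)) :: pvChunks (pvMiss g (((pvRunEnd g i : Nat) : Int) + 1)) := by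
  intro k
  induction k with
  | zero => intro i hk hi lo; omega
  | succ k ih =>
    intro i hk hi lo
    rw [pvRunEnd]
    by_cases h : i + 1 < 100 ∧ PySem.Set.contains g ((i : Int) + 1) = false
    · rw [dif_pos h]
      have h1 : ((i : Int) + 1) < 100 := by exact_mod_cast h.1
      have hstep : pvMiss g ((i : Int) + 1) = ((i : Int) + 1) :: pvMiss g ((i : Int) + 1 + 1) := by
        rw [pvMiss_step g ((i : Int) + 1) h1, h.2]; simp
      rw [hstep, pvGoChunk, if_pos rfl]
      have h2 : (((i + 1 : Nat)) : Int) = (i : Int) + 1 := by push_cast; ring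
      have := ih (i + 1) (by omega) h.1 lo
      rw [h2] at this
      exact this
    · rw [dif_neg h]
      cases hm : pvMiss g ((i : Int) + 1) with
      | nil => simp [pvGoChunk, pvChunks]
      | cons y ys =>
        have hy : y ≠ (i : Int) + 1 := by
          by_cases h2 : (i : Int) + 1 < 100
          · by_cases hc : PySem.Set.contains g ((i : Int) + 1) = true
            · have hs := pvMiss_step g ((i : Int) + 1) h2
              rw [if_pos hc] at hs
              have hmem : y ∈ pvMiss g ((i : Int) + 1 + 1) := by
                rw [← hs, hm]; exact List.mem_cons_self
              have := (pvMiss_mem g _ _ hmem).1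
              omega
            · exact absurd ⟨by exact_mod_cast h2, by simpa using hc⟩ h
          · have : pvMiss g ((i : Int) + 1) = [] := pvMiss_nil _ _ (by omega)
            rw [this] at hm; cases hm
        rw [pvGoChunk, if_neg hy, pvChunks]

theorem pvCollect_eq (g : PySem.Set Int) :
    ∀ (k i : Nat), 100 - i ≤ k →
      pvCollect g i = (pvChunks (pvMiss g (i : Int))).map (fun p => String.ofList (pvFmtI p)) := by
  intro k
  induction k with
  | zero =>
    intro i hk
    rw [pvCollect, dif_neg (by omega : ¬ i < 100),
      pvMiss_nil g i (by exact_mod_cast (by omega : 100 ≤ i))]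
    rfl
  | succ k ih =>
    intro i hk
    by_cases hi : i < 100
    · have hi' : (i : Int) < 100 := by exact_mod_cast hi
      rw [pvCollect, dif_pos hi]
      by_cases hc : PySem.Set.contains g (i : Int) = true
      · rw [if_pos hc, pvMiss_step g i hi', if_pos hc]
        have h2 : (((i + 1 : Nat)) : Int) = (i : Int) + 1 := by push_cast; ring
        have := ih (i + 1) (by omega)
        rw [h2] at this
        exact this
      · rw [if_neg hc]
        show String.ofList (pvFmtRun i (pvRunEnd g i)) :: pvCollect g (pvRunEnd g i + 1) =
          (pvChunks (pvMiss g (i : Int))).map (fun p => String.ofList (pvFmtI p))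
        have hstep := pvMiss_step g (i : Int) hi'
        rw [if_neg hc] at hstep
        rw [hstep, pvChunks, pvRunEnd_chunk g (k + 1) i hk hi (i : Int), List.map_cons]
        congr 1
        · unfold pvFmtRun pvFmtI
          simp only []
          by_cases he : i = pvRunEnd g i
          · rw [if_pos he, if_pos (show ((i : Int)) = ((pvRunEnd g i : Nat) : Int) by exact_mod_cast he)]
          · rw [if_neg he, if_neg (show ¬ ((i : Int)) = ((pvRunEnd g i : Nat) : Int) from
              fun hh => he (by exact_mod_cast hh))]
        · have h3 : (((pvRunEnd g i + 1 : Nat)) : Int) = ((pvRunEnd g i : Nat) : Int) + 1 := by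
            push_cast; ring
          have := ih (pvRunEnd g i + 1) (by have := pvRunEnd_ge g i; omega)
          rw [h3] at this
          exact this
    · rw [pvCollect, dif_neg hi,
        pvMiss_nil g i (by exact_mod_cast (by omega : 100 ≤ i))]
      rfl

theorem pvStepA_shift (x : Int) (xs : List Int) (st : List Char × Int × Int) (i : Nat)
    : pvStepA (x :: xs) st (i + 1) = pvStepA xs st i := by
  unfold pvStepA
  have hc : (((i + 1 : Nat)) : Int) = (((x :: xs).length : Nat) : Int) - 1 ↔
      ((i : Nat) : Int) = ((xs.length : Nat) : Int) - 1 := by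
    simp only [List.length_cons]; push_cast; omega
  simp only [List.getD_cons_succ, ne_eq, hc]

theorem pvFold_shift (x : Int) (xs : List Int) (st : List Char × Int × Int) :
    (List.range (x :: xs).length).foldl (pvStepA (x :: xs)) st =
      (List.range xs.length).foldl (pvStepA xs) (pvStepA (x :: xs) st 0) := by
  rw [List.length_cons, List.range_succ_eq_map, List.foldl_cons, List.foldl_map]
  exact PySem.List.foldl_congr_mem _ _ _ _ (fun acc j _ => pvStepA_shift x xs acc j)

theorem pvFoldA (xs : List Int) : ∀ (x : Int) (res : List Char) (lo high : Int),
    (x :: xs).Pairwise (· < ·) →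
    ((List.range (x :: xs).length).foldl (pvStepA (x :: xs)) (res, lo, high)).1 =
      res ++ (List.map (fun p => pvFmtI p ++ [',']) (pvGoChunk lo x xs)).flatten := by
  induction xs with
  | nil =>
    intro x res lo high hp
    by_cases he : lo = x <;>
      norm_num [pvStepA, pvGoChunk, pvFmtI, List.range_succ, he]
  | cons y ys ih =>
    intro x res lo high hp
    have hxy : x < y := (List.pairwise_cons.mp hp).1 y List.mem_cons_self
    rw [pvFold_shift]
    have hstep0 : pvStepA (x :: y :: ys) (res, lo, high) 0 =
        if y - x > 1 then (res ++ (pvFmtI (lo, x) ++ [',']), y, x) else (res, lo, x) := by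
      have hne : ¬ (((0 : Nat) : Int) = (((x :: y :: ys).length : Nat) : Int) - 1) := by
        simp only [List.length_cons]; push_cast; omega
      by_cases hgap : y - x > 1
      · rw [if_pos hgap]
        unfold pvStepA
        simp only [List.getD_cons_zero, List.getD_cons_succ]
        rw [if_pos (Or.inr hgap), if_pos hne]
        unfold pvFmtI
        by_cases he : lo = x
        · simp [he]
        · simp [he]
      · rw [if_neg hgap]
        unfold pvStepA
        simp only [List.getD_cons_zero, List.getD_cons_succ]
        rw [if_neg (not_or.mpr ⟨hne, hgap⟩)]
    rw [hstep0]
    by_cases hgap : y - x > 1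
    · rw [if_pos hgap]
      rw [ih y (res ++ (pvFmtI (lo, x) ++ [','])) y x (List.pairwise_cons.mp hp).2]
      rw [pvGoChunk, if_neg (by omega : ¬ y = x + 1)]
      simp [List.append_assoc]
    · rw [if_neg hgap]
      have hy : y = x + 1 := by omega
      rw [ih y res lo x (List.pairwise_cons.mp hp).2]
      rw [pvGoChunk, if_pos hy]

theorem pvDropLast_join (L : List (List Char)) (h : L ≠ []) :
    (List.map (· ++ [',']) L).flatten.dropLast = PySem.Chars.join [','] L := by
  induction L with
  | nil => cases h rfl
  | cons a t ih =>
    cases t with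
    | nil => simp [PySem.Chars.join, List.intercalate]
    | cons b t2 =>
      have hrest : (List.map (· ++ [',']) (b :: t2)).flatten ≠ [] := by simp
      rw [List.map_cons, List.flatten_cons, List.dropLast_append_of_ne_nil hrest, ih (by simp)]
      rw [PySem.Chars.join_cons_cons]

-- ===== VERDICT (by name: the statement is the Claim_ definition above) =====
theorem approachOne_spec : Claim_equal_approachOne := by
  intro arr _
  show approachOne arr = approachOne_alt arr
  simp only [approachOne, approachOne_alt]
  have h1 : (PySem.List.pyRange 0 100).foldl PySem.Set.add PySem.Set.empty = PySem.List.pyRange 0 100 := by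
    rw [show PySem.Set.empty = ([] : List Int) from rfl, ← PySem.Set.ofList_eq_foldl]
    exact PySem.Set.ofList_eq_self_of_nodup _ (PySem.List.nodup_pyRange_one 0 100)
  rw [h1]
  have h2 : PySem.Set.diff (PySem.List.pyRange 0 100) (PySem.Set.ofList arr) =
      pvMiss (PySem.Set.ofList arr) 0 := rfl
  rw [h2]
  rw [PySem.List.sorted_eq_self_of_pairwise _ _ ((pvMiss_pairwise (PySem.Set.ofList arr) 0).imp le_of_lt)]
  rw [pvCollect_eq (PySem.Set.ofList arr) 100 0 (by omega)]
  rw [PySem.List.slice_to_neg_one]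
  simp only [Nat.cast_zero]
  cases hM : pvMiss (PySem.Set.ofList arr) 0 with
  | nil => rfl
  | cons x xs =>
    have hp : (x :: xs).Pairwise (· < ·) := by rw [← hM]; exact pvMiss_pairwise _ 0
    have hlow : (if 0 < (x :: xs).length then ((PySem.List.pyGet? (x :: xs) 0).getD 0) else 0) = x := by
      simp [PySem.List.pyGet?, PySem.List.pyIdx?]
    rw [hlow, pvFoldA xs x [] x 0 hp, List.nil_append]
    have hmm : List.map (fun p => pvFmtI p ++ [',']) (pvGoChunk x x xs)
        = List.map (· ++ [',']) (List.map pvFmtI (pvGoChunk x x xs)) := by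
      rw [List.map_map]; rfl
    have hne : List.map pvFmtI (pvGoChunk x x xs) ≠ [] := by
      simp [pvGoChunk_ne_nil]
    rw [hmm, pvDropLast_join _ hne, pvChunks]
    unfold PySem.Str.join
    rw [List.map_map]
    refine congrArg String.ofList ?_
    rw [show (",").toList = [','] from rfl]
    exact congrArg (PySem.Chars.join [','])
      (List.map_congr_left (fun p _ => (String.toList_ofList).symm))
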